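-- pv_equiv track=rewrite | github.com/the-omega-institute/automath | theory/2026_golden_ratio_driven_scan_projection_generation_recursive_emergence/scripts/equational_theory/stable_dashboard_unknowns.py | pairs_from_bits
-- ===== SOURCE A (Python) =====
-- def pairs_from_bits(bits: int, equation_count: int) -> list[dict[str, int]]:
--     pairs = []
--     while bits:
--         low_bit = bits & -bits
--         position = low_bit.bit_length() - 1
--         bits -= low_bit
--         pairs.append(
--             {
--                 "satisfies": position // equation_count + 1,
--                 "refutes": position % equation_count + 1,
--             }
--         )
--     return pairs
-- ===== SOURCE B (Python) =====
-- def pairs_from_bits(bits: int, equation_count: int) -> list[dict[str, int]]: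
--     return [
--         {
--             "satisfies": position // equation_count + 1,
--             "refutes": position % equation_count + 1,
--         }
--         for position in range(bits.bit_length())
--         if (bits >> position) & 1
--     ]
-- ===== Notes on version B (the rewrite author's own statement) =====
-- stated objective: idiomatic
-- what changed: Replaced the destructive isolate-lowest-set-bit while loop (bits & -bits, bit_length, subtract) by a single list comprehension over range(bits.bit_length()) that tests each position with a shift-and-mask.
import Mathlib
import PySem

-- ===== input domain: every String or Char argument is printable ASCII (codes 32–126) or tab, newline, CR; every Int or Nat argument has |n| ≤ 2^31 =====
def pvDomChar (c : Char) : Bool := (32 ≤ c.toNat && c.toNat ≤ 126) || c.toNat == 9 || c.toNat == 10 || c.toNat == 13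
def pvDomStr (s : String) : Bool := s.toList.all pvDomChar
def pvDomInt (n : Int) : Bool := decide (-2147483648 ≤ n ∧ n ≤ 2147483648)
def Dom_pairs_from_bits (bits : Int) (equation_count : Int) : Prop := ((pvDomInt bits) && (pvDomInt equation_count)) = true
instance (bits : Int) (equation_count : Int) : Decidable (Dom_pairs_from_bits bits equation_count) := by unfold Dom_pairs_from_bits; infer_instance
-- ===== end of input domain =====

-- B replaces A's destructive isolate-lowest-set-bit while loop by one list comprehension over
-- range(bits.bit_length()) testing each position with a shift-and-mask (idiomatic; not claimed faster).

-- ===== PORT A =====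
-- 'while bits:' ported with a generous fuel guard (bits.natAbs + 1 ≥ popcount iterations);
-- Python's low_bit.bit_length() - 1 is PySem.Int.bitLength low_bit - 1.
def pairsALoop (equation_count : Int) : Nat → Int → List (List (String × Int))
  | 0, _ => []
  | fuel + 1, bits =>
    if bits = 0 then []
    else
      let low_bit := PySem.Int.band bits (-bits)
      let position : Int := (PySem.Int.bitLength low_bit : Int) - 1
      [("satisfies", PySem.Int.floordiv position equation_count + 1),
       ("refutes", PySem.Int.mod position equation_count + 1)]
        :: pairsALoop equation_count fuel (bits - low_bit)

def pairs_from_bits (bits : Int) (equation_count : Int) : List (List (String × Int)) :=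
  pairsALoop equation_count (bits.natAbs + 1) bits

-- ===== PORT B =====
-- list comprehension '[entry for position in range(bits.bit_length()) if (bits >> position) & 1]'
-- ported as filter-then-map over pyRange; every position the range yields is ≥ 0, so
-- 'position.toNat' is exact for Python's 'bits >> position'.
def pairs_from_bits_alt (bits : Int) (equation_count : Int) : List (List (String × Int)) :=
  ((PySem.List.pyRange 0 (PySem.Int.bitLength bits : Int) 1).filter
      (fun position => PySem.Int.band (bits >>> position.toNat) 1 != 0)).map
    (fun position =>
      [("satisfies", PySem.Int.floordiv position equation_count + 1),
       ("refutes", PySem.Int.mod position equation_count + 1)])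

-- ===== PRECONDITION & SPEC =====
-- Pre_ excludes exactly where Python A does not return: negative bits (A's while loop never
-- terminates) and equation_count = 0 with a set bit present (ZeroDivisionError in both);
-- nothing is carved out of A's actual return domain.
def Pre_pairs_from_bits (bits : Int) (equation_count : Int) : Prop :=
  0 ≤ bits ∧ (bits ≠ 0 → equation_count ≠ 0)
instance (bits : Int) (equation_count : Int) : Decidable (Pre_pairs_from_bits bits equation_count) := by
  unfold Pre_pairs_from_bits; infer_instance

def pvWitness_pairs_from_bits : Int × Int := (5, 2)

def Spec_pairs_from_bits (bits : Int) (equation_count : Int) (out : List (List (String × Int))) : Prop := out = pairs_from_bits_alt bits equation_count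
instance (bits : Int) (equation_count : Int) (out : List (List (String × Int))) : Decidable (Spec_pairs_from_bits bits equation_count out) := by unfold Spec_pairs_from_bits; infer_instance

-- ===== CLAIM (what is proved, stated in full; the proofs are below) =====
def Claim_equal_pairs_from_bits : Prop := ∀ (bits : Int) (equation_count : Int), Dom_pairs_from_bits bits equation_count → Pre_pairs_from_bits bits equation_count → Spec_pairs_from_bits bits equation_count (pairs_from_bits bits equation_count)

-- ===== LEMMAS AND PROOFS =====

-- the entry both programs produce for absolute bit position `pos`
def pvEntry (equation_count pos : Int) : List (String × Int) :=
  [("satisfies", PySem.Int.floordiv pos equation_count + 1),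
   ("refutes", PySem.Int.mod pos equation_count + 1)]

-- common reference function: entries of the set bits of n, low to high, offset pos
def pvSpec (equation_count : Int) (n : Nat) (pos : Int) : List (List (String × Int)) :=
  if h : n = 0 then []
  else (if n % 2 = 1 then [pvEntry equation_count pos] else []) ++ pvSpec equation_count (n / 2) (pos + 1)
  termination_by n
  decreasing_by exact Nat.div_lt_self (Nat.pos_of_ne_zero h) one_lt_two

-- lowest set bit of n (value of Python's bits & -bits for positive bits)
def pvLb (n : Nat) : Nat := n - (n &&& (n - 1))

lemma pv_and_pred_odd (n : Nat) (h : n % 2 = 1) : n &&& (n - 1) = n - 1 := by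
  apply Nat.eq_of_testBit_eq
  intro i
  cases i with
  | zero =>
    have h0 : (n - 1) % 2 = 0 := by omega
    simp [Nat.testBit_zero, h, h0]
  | succ i =>
    have h2 : (n - 1) / 2 = n / 2 := by omega
    rw [Nat.testBit_and]
    simp only [Nat.testBit_succ, h2, Bool.and_self]

lemma pv_and_pred_even (m : Nat) (h : 0 < m) : (2 * m) &&& (2 * m - 1) = 2 * (m &&& (m - 1)) := by
  apply Nat.eq_of_testBit_eq
  intro i
  cases i with
  | zero =>
    simp [Nat.testBit_zero, Nat.mul_mod_right]
  | succ i =>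
    have h1 : (2 * m) / 2 = m := by omega
    have h2 : (2 * m - 1) / 2 = m - 1 := by omega
    have h3 : (2 * (m &&& (m - 1))) / 2 = m &&& (m - 1) := by omega
    rw [Nat.testBit_and]
    simp only [Nat.testBit_succ, h1, h2, h3, Nat.testBit_and]

lemma pvLb_odd (n : Nat) (h : n % 2 = 1) : pvLb n = 1 := by
  unfold pvLb
  rw [pv_and_pred_odd n h]; omega

lemma pvLb_even (m : Nat) (h : 0 < m) : pvLb (2 * m) = 2 * pvLb m := by
  unfold pvLb
  rw [pv_and_pred_even m h]
  have := Nat.and_le_left (n := m) (m := m - 1)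
  omega

lemma pvLb_le (n : Nat) : pvLb n ≤ n := by unfold pvLb; omega

lemma pvLb_pos (n : Nat) (h : 0 < n) : 0 < pvLb n := by
  induction n using Nat.strong_induction_on with
  | _ n ih =>
    rcases Nat.even_or_odd n with he | ho
    · obtain ⟨m, hm⟩ := he
      subst hm
      rw [(by ring : m + m = 2 * m), pvLb_even m (by omega)]
      have := ih m (by omega) (by omega)
      omega
    · rw [pvLb_odd n (Nat.odd_iff.mp ho)]; omega

-- Python's bits & -bits on a positive input, through PySem's two's-complement band
lemma pv_band_neg (n : Nat) (h : 0 < n) :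
    PySem.Int.band (n : Int) (-(n : Int)) = ((pvLb n : Nat) : Int) := by
  have h0 : ¬ (0 ≤ -(n : Int)) := by omega
  simp only [PySem.Int.band, if_pos (by positivity : (0:Int) ≤ (n:Int)), if_neg h0]
  have : (-(-(n : Int)) - 1).toNat = n - 1 := by omega
  rw [this]
  simp [pvLb]

-- absolute position of the lowest set bit, as A computes it
def pvPos (n : Nat) : Int := (PySem.Int.bitLength ((pvLb n : Nat) : Int) : Int) - 1

lemma pvPos_odd (n : Nat) (h : n % 2 = 1) : pvPos n = 0 := by
  unfold pvPos; rw [pvLb_odd n h]; decide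

lemma pvPos_even (m : Nat) (h : 0 < m) : pvPos (2 * m) = pvPos m + 1 := by
  unfold pvPos
  rw [pvLb_even m h]
  have hp : 0 < 2 * pvLb m := by have := pvLb_pos m h; omega
  have hbl : PySem.Int.bitLength ((2 * pvLb m : Nat) : Int)
      = PySem.Int.bitLength ((pvLb m : Nat) : Int) + 1 := by
    have h2 : (2 * pvLb m) / 2 = pvLb m := by omega
    have := PySem.Int.bitLength_natCast (m := 2 * pvLb m) hp
    rwa [h2] at this
  rw [hbl]; push_cast; ring

lemma pvSpec_even (ec : Int) (k : Nat) (pos : Int) :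
    pvSpec ec (2 * k) pos = pvSpec ec k (pos + 1) := by
  by_cases hk : k = 0
  · subst hk; rw [pvSpec, pvSpec]; simp
  · rw [pvSpec]
    have : ¬ (2 * k = 0) := by omega
    simp only [this, dif_neg, not_false_iff]
    have : (2 * k) % 2 = 0 := by omega
    simp [this, Nat.mul_div_cancel_left k (by omega : 0 < 2)]

lemma pvSpec_pop (ec : Int) (n : Nat) (h : 0 < n) (pos : Int) :
    pvSpec ec n pos = pvEntry ec (pos + pvPos n) :: pvSpec ec (n - pvLb n) pos := by
  induction n using Nat.strong_induction_on generalizing pos with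
  | _ n ih =>
    rcases Nat.even_or_odd n with he | ho
    · obtain ⟨m, hm⟩ := he
      have hm' : n = 2 * m := by omega
      subst hm'
      have hmpos : 0 < m := by omega
      rw [pvSpec_even, ih m (by omega) hmpos (pos + 1),
          pvPos_even m hmpos, pvLb_even m hmpos]
      have h2 : 2 * m - 2 * pvLb m = 2 * (m - pvLb m) := by omega
      rw [h2, pvSpec_even]
      congr 1
      · congr 1; ring
    · have hodd := Nat.odd_iff.mp ho
      rw [pvSpec]
      simp only [dif_neg (by omega : ¬ n = 0), hodd]
      rw [pvPos_odd n hodd, pvLb_odd n hodd, add_zero]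
      by_cases h1 : n = 1
      · subst h1
        simp [pvSpec]
      · have : n - 1 = 2 * (n / 2) := by omega
        rw [this, pvSpec_even]
        simp

lemma pv_loopA_eq (ec : Int) (n : Nat) :
    ∀ f, n ≤ f → pairsALoop ec f (n : Int) = pvSpec ec n 0 := by
  induction n using Nat.strong_induction_on with
  | _ n ih =>
    intro f hf
    by_cases h0 : n = 0
    · subst h0
      cases f with
      | zero => rw [pairsALoop, pvSpec]; simp
      | succ f => rw [pairsALoop, pvSpec]; simp
    · have hn : 0 < n := by omega
      obtain ⟨f', rfl⟩ : ∃ f', f = f' + 1 := ⟨f - 1, by omega⟩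
      rw [pairsALoop]
      have hne : ¬ ((n : Int) = 0) := by exact_mod_cast h0
      rw [if_neg hne]
      simp only [pv_band_neg n hn]
      have hsub : (n : Int) - ((pvLb n : Nat) : Int) = ((n - pvLb n : Nat) : Int) := by
        have := pvLb_le n; omega
      rw [hsub, ih (n - pvLb n) (by have := pvLb_pos n hn; omega) f'
            (by have := pvLb_pos n hn; omega)]
      rw [pvSpec_pop ec n hn 0]
      simp [pvEntry, pvPos]

-- B's comprehension over Nat: positions below bit_length whose bit is set, mapped to entries
def pvG (ec : Int) (n : Nat) (pos : Int) : List (List (String × Int)) :=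
  ((List.range (PySem.Int.bitLength (n : Int))).filter
      (fun k => decide ((n >>> k) % 2 = 1))).map
    (fun (k : Nat) => pvEntry ec (pos + (k : Int)))

-- shifting the scanned positions by one = halving the number and bumping the offset
lemma pv_shift_step (ec : Int) (n : Nat) (pos : Int) (L : Nat) :
    (((List.range L).map Nat.succ).filter (fun k => decide ((n >>> k) % 2 = 1))).map
        (fun (k : Nat) => pvEntry ec (pos + (k : Int)))
      = ((List.range L).filter (fun k => decide (((n / 2) >>> k) % 2 = 1))).map
        (fun (k : Nat) => pvEntry ec ((pos + 1) + (k : Int))) := by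
  induction L with
  | zero => simp
  | succ L ih =>
    rw [List.range_succ, List.map_append, List.filter_append, List.filter_append,
        List.map_append, List.map_append, ih]
    congr 1
    have hsh : n >>> (L + 1) = (n / 2) >>> L := by
      simp [Nat.shiftRight_eq_div_pow, pow_succ, Nat.div_div_eq_div_mul, mul_comm]
    by_cases hb : (n / 2).testBit L
    · simp [Nat.testBit_succ, hb]
      congr 1
      ring
    · simp [Nat.succ_eq_add_one, Nat.testBit_succ, hb]

lemma pvG_eq_pvSpec (ec : Int) (n : Nat) :
    ∀ pos, pvG ec n pos = pvSpec ec n pos := by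
  induction n using Nat.strong_induction_on with
  | _ n ih =>
    intro pos
    by_cases h0 : n = 0
    · subst h0
      rw [pvSpec]
      simp [pvG, PySem.Int.bitLength_zero]
    · have hn : 0 < n := by omega
      have hbl : PySem.Int.bitLength (n : Int)
          = PySem.Int.bitLength ((n / 2 : Nat) : Int) + 1 := PySem.Int.bitLength_natCast hn
      rw [pvSpec, dif_neg h0, ← ih (n / 2) (Nat.div_lt_self hn one_lt_two) (pos + 1)]
      unfold pvG
      rw [hbl, List.range_succ_eq_map, List.filter_cons]
      by_cases hodd : n % 2 = 1
      · have hp0 : decide ((n >>> 0) % 2 = 1) = true := by simpa using hodd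
        rw [hp0, if_pos rfl, List.map_cons, pv_shift_step]
        simp [hodd]
      · have hp0 : ¬ (decide ((n >>> 0) % 2 = 1) = true) := by simpa using hodd
        rw [if_neg hp0, pv_shift_step]
        simp [hodd]

-- the comprehension's Bool test on a Nat input is the bit test pvG uses
lemma pv_test_eq (n k : Nat) :
    (PySem.Int.band ((n : Int) >>> ((k : Nat) : Int)) 1 != 0) = decide ((n >>> k) % 2 = 1) := by
  rw [(by simp : ((n : Int) >>> ((k : Nat) : Int)) = ((n >>> k : Nat) : Int)),
      (Nat.cast_one (R := Int)).symm, PySem.Int.band_natCast, Nat.and_one_is_mod]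
  rcases Nat.mod_two_eq_zero_or_one (n >>> k) with h | h <;> simp [h]

-- pushing a filter-then-map over Int positions down to Nat positions, on a cast range
lemma pv_castdown {α : Type} (p : Int → Bool) (q : Nat → Bool) (f : Int → α) (g : Nat → α)
    (L : Nat) (hpq : ∀ k, p ((k : Nat) : Int) = q k) (hfg : ∀ k, f ((k : Nat) : Int) = g k) :
    (((List.range L).map (fun k : Nat => (k : Int))).filter p).map f
      = ((List.range L).filter q).map g := by
  induction L with
  | zero => simp
  | succ L ih =>
    rw [List.range_succ, List.map_append, List.filter_append, List.filter_append,
        List.map_append, List.map_append, ih]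
    congr 1
    by_cases hb : q L = true
    · simp [hpq, hfg, hb]
    · simp [hpq, hb]

-- B's port on a natural-number input computes pvG (and hence pvSpec)
lemma pv_alt_eq (ec : Int) (n : Nat) :
    pairs_from_bits_alt (n : Int) ec = pvSpec ec n 0 := by
  rw [← pvG_eq_pvSpec]
  unfold pairs_from_bits_alt pvG
  rw [PySem.List.pyRange_zero_nat]
  apply pv_castdown
  · intro k
    rw [Int.toNat_natCast]
    exact pv_test_eq n k
  · intro k
    simp [pvEntry]

-- ===== VERDICT (by name: the statement is the Claim_ definition above) =====
theorem pairs_from_bits_spec : Claim_equal_pairs_from_bits := by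
  intro bits ec _ hpre
  unfold Spec_pairs_from_bits pairs_from_bits
  obtain ⟨hb, _⟩ := hpre
  obtain ⟨n, rfl⟩ : ∃ n : Nat, bits = (n : Int) := ⟨bits.toNat, by omega⟩
  rw [pv_loopA_eq ec n ((n : Int).natAbs + 1) (by simp), pv_alt_eq]
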